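-- pv_equiv track=rewrite | github.com/Remag29/AdventOfCode | 2023/14/part2.py | roll_V2
-- ===== SOURCE A (Python) =====
-- def roll_V2(lines):  # ~ 2x faster than roll, but not enough =/
--     new_lines = []
--     for line in lines:
--         new_line = []
--         splitted_line = line.split('#')
--         for splitted_part in splitted_line:
--             # Sort splitted_part : O first, . second
--             new_line.append(''.join(sorted(splitted_part, key=lambda x: x == 'O', reverse=True)))
--         new_lines.append('#'.join(new_line))
--     return new_lines
-- ===== SOURCE B (Python) =====
-- def roll_V2(lines):
--     new_lines = []
--     for line in lines:
--         parts = []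
--         count = 0
--         others = []
--         for ch in line:
--             if ch == '#':
--                 parts.append('O' * count + ''.join(others))
--                 count = 0
--                 others = []
--             elif ch == 'O':
--                 count += 1
--             else:
--                 others.append(ch)
--         parts.append('O' * count + ''.join(others))
--         new_lines.append('#'.join(parts))
--     return new_lines
-- ===== Notes on version B (the rewrite author's own statement) =====
-- stated objective: faster
-- what changed: Replaces split('#') plus a per-segment stable sort with a single left-to-right counting pass per line that emits 'O'*count followed by the other characters of each '#'-delimited run in order.
import Mathlib
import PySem

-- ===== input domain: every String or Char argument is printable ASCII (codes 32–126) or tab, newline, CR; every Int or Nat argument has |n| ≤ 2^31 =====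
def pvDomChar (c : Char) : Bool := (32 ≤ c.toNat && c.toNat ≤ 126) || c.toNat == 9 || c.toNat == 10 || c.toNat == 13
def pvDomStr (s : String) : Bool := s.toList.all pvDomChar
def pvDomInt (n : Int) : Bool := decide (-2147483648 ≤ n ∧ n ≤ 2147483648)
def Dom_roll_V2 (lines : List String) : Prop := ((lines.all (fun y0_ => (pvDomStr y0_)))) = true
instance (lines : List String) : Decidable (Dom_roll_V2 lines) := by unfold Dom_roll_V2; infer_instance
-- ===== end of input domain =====

-- B replaces split('#') + a per-segment stable sort with one counting pass per line (same return value).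

-- ===== PORT A =====
def roll_V2 (lines : List String) : List String :=
  lines.foldl (fun new_lines line =>
    let splitted_line := PySem.Chars.splitOn line.toList ['#']
    let new_line := splitted_line.foldl (fun nl splitted_part =>
      nl ++ [PySem.List.sorted splitted_part (fun x => x == 'O') true]) []
    new_lines ++ [String.ofList (PySem.Chars.join ['#'] new_line)]) []

-- ===== PORT B =====
-- state: (finished parts, count of 'O' in the current run, the other chars of the current run)
def rollStep (st : List (List Char) × Nat × List Char) (ch : Char) :
    List (List Char) × Nat × List Char :=
  if ch = '#' then (st.1 ++ [List.replicate st.2.1 'O' ++ st.2.2], 0, [])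
  else if ch = 'O' then (st.1, st.2.1 + 1, st.2.2)
  else (st.1, st.2.1, st.2.2 ++ [ch])

def roll_V2_alt (lines : List String) : List String :=
  lines.foldl (fun out line =>
    let st := line.toList.foldl rollStep ([], 0, [])
    let parts := st.1 ++ [List.replicate st.2.1 'O' ++ st.2.2]
    out ++ [String.ofList (PySem.Chars.join ['#'] parts)]) []

-- ===== PRECONDITION & SPEC =====
def Spec_roll_V2 (lines : List String) (out : List String) : Prop := out = roll_V2_alt lines
instance (lines : List String) (out : List String) : Decidable (Spec_roll_V2 lines out) := by unfold Spec_roll_V2; infer_instance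

-- ===== CLAIM (what is proved, stated in full; the proofs are below) =====
def Claim_equal_roll_V2 : Prop := ∀ (lines : List String), Dom_roll_V2 lines → Spec_roll_V2 lines (roll_V2 lines)

-- ===== LEMMAS AND PROOFS =====

-- structural model of line.split('#')
def mySplit : List Char → List (List Char)
  | [] => [[]]
  | c :: cs =>
    if c = '#' then [] :: mySplit cs
    else match mySplit cs with
      | [] => [[c]]
      | s :: rest => (c :: s) :: rest

def glue (pre : List Char) : List (List Char) → List (List Char)
  | [] => [pre]
  | s :: rest => (pre ++ s) :: rest

-- what both programs produce for one '#'-free segment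
def segOut (p : List Char) : List Char :=
  List.replicate (p.count 'O') 'O' ++ p.filter (fun c => c ≠ 'O')

def finishSt (st : List (List Char) × Nat × List Char) : List (List Char) :=
  st.1 ++ [List.replicate st.2.1 'O' ++ st.2.2]

def merge (c : Nat) (o : List Char) : List (List Char) → List (List Char)
  | [] => []
  | s :: rest => (List.replicate (c + s.count 'O') 'O' ++ o ++ s.filter (fun x => x ≠ 'O')) :: rest.map segOut

theorem mySplit_cons (cs : List Char) : ∃ s r, mySplit cs = s :: r := by
  cases cs with
  | nil => exact ⟨[], [], rfl⟩
  | cons c cs =>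
    by_cases h : c = '#'
    · exact ⟨[], mySplit cs, by simp [mySplit, h]⟩
    · obtain ⟨s, r, hs⟩ : ∃ s r, mySplit cs = s :: r := by
        cases hm : mySplit cs with
        | nil =>
          exfalso
          induction cs with
          | nil => simp [mySplit] at hm
          | cons d ds ih =>
            by_cases hd : d = '#'
            · simp [mySplit, hd] at hm
            · simp only [mySplit, hd] at hm
              cases h2 : mySplit ds with
              | nil => rw [h2] at hm; simp at hm
              | cons a b => rw [h2] at hm; simp at hm
        | cons a b => exact ⟨a, b, rfl⟩
      exact ⟨c :: s, r, by simp [mySplit, h, hs]⟩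

theorem go_eq (fuel : Nat) : ∀ (l cur acc : _), l.length < fuel →
    PySem.Chars.splitOn.go ['#'] fuel l cur acc
      = acc.reverse ++ glue cur.reverse (mySplit l) := by
  induction fuel with
  | zero => intro l cur acc h; omega
  | succ fuel ih =>
    intro l cur acc h
    cases l with
    | nil => simp [PySem.Chars.splitOn.go, mySplit, glue]
    | cons c rest =>
      by_cases hc : c = '#'
      · subst hc
        have : List.isPrefixOf ['#'] ('#' :: rest) = true := by simp [List.isPrefixOf]
        rw [PySem.Chars.splitOn.go]
        simp only [this, if_pos]
        rw [show List.drop (['#'] : List Char).length ('#' :: rest) = rest from rfl]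
        rw [ih rest [] (cur.reverse :: acc) (by simp at h ⊢; omega)]
        obtain ⟨s, r, hs⟩ := mySplit_cons rest
        simp [mySplit, hs, glue]
      · have hp : List.isPrefixOf ['#'] (c :: rest) = false := by
          simp [List.isPrefixOf]; exact fun h' => hc h'.symm
        rw [PySem.Chars.splitOn.go]
        simp only [hp, Bool.false_eq_true, if_neg, not_false_iff]
        rw [ih rest (c :: cur) acc (by simp at h ⊢; omega)]
        obtain ⟨s, r, hs⟩ := mySplit_cons rest
        simp [mySplit, hc, hs, glue]

theorem splitOn_eq (cs : List Char) : PySem.Chars.splitOn cs ['#'] = mySplit cs := by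
  unfold PySem.Chars.splitOn
  rw [go_eq (cs.length + 1) cs [] [] (by omega)]
  obtain ⟨s, r, hs⟩ := mySplit_cons cs
  simp [hs, glue]

-- the insertion-sort comparator used by sorted(key = (· == 'O'), reverse = True)
theorem insertBy_O (n : Nat) (others : List Char) (h : ∀ y ∈ others, y ≠ 'O') :
    PySem.List.insertBy (fun a b => decide ((b == 'O') < (a == 'O'))) 'O'
      (List.replicate n 'O' ++ others)
      = List.replicate (n + 1) 'O' ++ others := by
  induction n with
  | zero =>
    cases others with
    | nil => simp [PySem.List.insertBy]
    | cons y ys =>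
      have hy : y ≠ 'O' := h y (by simp)
      simp [PySem.List.insertBy, Bool.lt_iff, hy]
  | succ n ih =>
    have : (('O' == 'O') < ('O' == 'O')) = False := by simp
    simp only [List.replicate_succ, List.cons_append, PySem.List.insertBy]
    rw [if_neg (by simp)]
    rw [ih]
    simp [List.replicate_succ]

theorem insertBy_other (x : Char) (hx : x ≠ 'O') (l : List Char) :
    PySem.List.insertBy (fun a b => decide ((b == 'O') < (a == 'O'))) x l = l ++ [x] := by
  induction l with
  | nil => simp [PySem.List.insertBy]
  | cons y ys ih =>
    have : ((y == 'O') < (x == 'O')) = False := by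
      simp [Bool.lt_iff, hx]
    simp [PySem.List.insertBy, this, ih]

theorem sorted_seg (p : List Char) :
    PySem.List.sorted p (fun x => x == 'O') true = segOut p := by
  rw [PySem.List.sorted_rev_eq_foldl_insertBy]
  induction p using List.reverseRecOn with
  | nil => simp [segOut]
  | append_singleton q x ih =>
    rw [List.foldl_append, List.foldl_cons, List.foldl_nil, ih]
    by_cases hx : x = 'O'
    · subst hx
      unfold segOut
      rw [insertBy_O (q.count 'O') (q.filter (fun c => c ≠ 'O'))
        (by intro y hy; simpa using (List.of_mem_filter hy))]
      simp [List.count_append, List.filter_append]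
    · rw [insertBy_other x hx]
      unfold segOut
      simp [List.count_append, List.filter_append, hx]

theorem merge_zero (u : List (List Char)) (h : u ≠ []) :
    merge 0 [] u = u.map segOut := by
  cases u with
  | nil => exact absurd rfl h
  | cons s r => simp [merge, segOut]

theorem scan_eq (cs : List Char) : ∀ parts c o,
    finishSt (cs.foldl rollStep (parts, c, o)) = parts ++ merge c o (mySplit cs) := by
  induction cs with
  | nil => intro parts c o; simp [finishSt, mySplit, merge]
  | cons ch cs ih =>
    intro parts c o
    by_cases h1 : ch = '#'
    · subst h1
      rw [List.foldl_cons]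
      show finishSt (cs.foldl rollStep (parts ++ [List.replicate c 'O' ++ o], 0, [])) = _
      rw [ih]
      obtain ⟨s, r, hs⟩ := mySplit_cons cs
      rw [merge_zero _ (by rw [hs]; exact List.cons_ne_nil _ _)]
      simp [mySplit, hs, merge]
    · by_cases h2 : ch = 'O'
      · subst h2
        rw [List.foldl_cons]
        show finishSt (cs.foldl rollStep (parts, c + 1, o)) = _
        rw [ih]
        obtain ⟨s, r, hs⟩ := mySplit_cons cs
        have harith : c + (s.count 'O' + 1) = c + 1 + s.count 'O' := by omega
        simp [mySplit, h1, hs, merge, harith]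
      · rw [List.foldl_cons,
          show rollStep (parts, c, o) ch = (parts, c, o ++ [ch]) by simp [rollStep, h1, h2]]
        rw [ih]
        obtain ⟨s, r, hs⟩ := mySplit_cons cs
        simp [mySplit, h1, h2, hs, merge]

theorem foldl_append_eq_map {α β : Type} (g : α → β) (xs : List α) :
    ∀ (a : List β), xs.foldl (fun acc x => acc ++ [g x]) a = a ++ xs.map g := by
  induction xs with
  | nil => simp
  | cons x xs ih => intro a; simp [ih]

theorem line_eq (line : List Char) :
    (PySem.Chars.splitOn line ['#']).foldl
        (fun nl part => nl ++ [PySem.List.sorted part (fun x => x == 'O') true]) []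
      = finishSt (line.foldl rollStep ([], 0, [])) := by
  rw [foldl_append_eq_map, splitOn_eq, scan_eq]
  obtain ⟨s, r, hs⟩ := mySplit_cons line
  rw [merge_zero _ (by rw [hs]; exact List.cons_ne_nil _ _)]
  simp [funext sorted_seg]

-- ===== VERDICT (by name: the statement is the Claim_ definition above) =====
theorem roll_V2_spec : Claim_equal_roll_V2 := by
  intro lines _
  unfold Spec_roll_V2 roll_V2 roll_V2_alt
  rw [foldl_append_eq_map, foldl_append_eq_map]
  simp only [List.nil_append]
  apply List.map_congr_left
  intro line _
  have h := line_eq line.toList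
  simp only [finishSt] at h
  rw [h]
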